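-- pv_equiv track=rewrite | github.com/n-inferno/route-256-ozon | contest_E.py | evaluate
-- ===== SOURCE A (Python) =====
-- def evaluate(report):
--     seen = set()
--     prev = report[0]
--     for entry in report:
--         if entry in seen and entry != prev:
--             return False
--         seen.add(entry)
--         prev = entry
--     return True
-- ===== SOURCE B (Python) =====
-- def evaluate(report):
--     prev = report[0]
--     runs = [prev]
--     for entry in report[1:]:
--         if entry != prev:
--             runs.append(entry)
--             prev = entry
--     return len(runs) == len(set(runs))
-- ===== Notes on version B (the rewrite author's own statement) =====
-- stated objective: alternative
-- what changed: Replaces A's single early-exit pass with a seen-set by a two-phase decomposition: first materialize the run-compressed sequence, then return whether its length equals the length of its set of distinct values.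
import Mathlib
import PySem

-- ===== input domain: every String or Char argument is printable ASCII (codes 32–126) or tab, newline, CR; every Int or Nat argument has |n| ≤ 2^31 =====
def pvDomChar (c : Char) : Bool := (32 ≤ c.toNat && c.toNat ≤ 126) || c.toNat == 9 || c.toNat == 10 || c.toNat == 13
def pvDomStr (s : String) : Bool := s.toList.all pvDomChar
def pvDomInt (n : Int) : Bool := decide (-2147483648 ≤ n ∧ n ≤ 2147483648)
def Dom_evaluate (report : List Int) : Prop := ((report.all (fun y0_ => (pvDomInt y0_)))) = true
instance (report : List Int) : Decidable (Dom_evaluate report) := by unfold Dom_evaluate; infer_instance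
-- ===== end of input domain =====

-- B replaces A's single early-exit pass by materializing the run-compressed
-- sequence first, then checking its values are pairwise distinct (objective: alternative).
-- ===== PORT A =====
-- the for-loop of A: state = (seen, prev), early return False becomes result false
def evalLoopA (seen : PySem.Set Int) (prev : Int) : List Int → Bool
  | [] => true
  | e :: rest =>
    if PySem.Set.contains seen e && e != prev then false
    else evalLoopA (PySem.Set.add seen e) e rest

def evaluate (report : List Int) : Bool :=
  match report with
  | [] => false   -- indexing the first element raises IndexError in Python; excluded by Pre_evaluate
  | p0 :: _ => evalLoopA PySem.Set.empty p0 report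

-- ===== PORT B =====
-- the for-loop of B over report[1:]: builds the tail of the run-compressed list
def runsLoop (prev : Int) : List Int → List Int
  | [] => []
  | e :: rest => if e != prev then e :: runsLoop e rest else runsLoop prev rest

def evaluate_alt (report : List Int) : Bool :=
  match report with
  | [] => false   -- indexing the first element raises IndexError in Python; excluded by Pre_evaluate
  | p0 :: rest =>
    let runs := p0 :: runsLoop p0 rest
    runs.length == (PySem.Set.ofList runs).length

-- ===== PRECONDITION & SPEC =====
-- Pre_ excludes only the empty list, on which both Pythons raise IndexError reading the first element.
def Pre_evaluate (report : List Int) : Prop := report ≠ []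
instance (report : List Int) : Decidable (Pre_evaluate report) := by unfold Pre_evaluate; infer_instance
def pvWitness_evaluate : List Int := ([1, 1, 2])

def Spec_evaluate (report : List Int) (out : Bool) : Prop := out = evaluate_alt report
instance (report : List Int) (out : Bool) : Decidable (Spec_evaluate report out) := by unfold Spec_evaluate; infer_instance

-- ===== CLAIM (what is proved, stated in full; the proofs are below) =====
def Claim_equal_evaluate : Prop := ∀ (report : List Int), Dom_evaluate report → Pre_evaluate report → Spec_evaluate report (evaluate report)

-- ===== LEMMAS AND PROOFS =====

-- A's loop returns true iff the remaining run representatives are pairwise distinct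
-- and none of them has been seen already.
theorem evalLoopA_iff (xs : List Int) : ∀ (seen : PySem.Set Int) (prev : Int),
    prev ∈ seen →
    (evalLoopA seen prev xs = true ↔
      (runsLoop prev xs).Nodup ∧ ∀ r ∈ runsLoop prev xs, r ∉ seen) := by
  induction xs with
  | nil => intro seen prev _; simp [evalLoopA, runsLoop]
  | cons e rest ih =>
    intro seen prev hprev
    by_cases he : e = prev
    · subst he
      have hadd : PySem.Set.add seen e = seen := PySem.Set.add_of_mem hprev
      simp only [evalLoopA, runsLoop, bne_self_eq_false, Bool.and_false, hadd]
      simpa using ih seen e hprev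
    · by_cases hm : e ∈ seen
      · have hc : PySem.Set.contains seen e = true := (PySem.Set.contains_iff seen e).mpr hm
        simp only [evalLoopA, runsLoop, hc, Bool.true_and, bne_iff_ne, ne_eq, he,
          not_false_iff, if_true]
        simp only [Bool.false_eq_true, false_iff, not_and, not_forall]
        intro _
        exact ⟨e, by simp, by simpa using hm⟩
      · have hc : PySem.Set.contains seen e = false := by
          rw [Bool.eq_false_iff]
          intro h; exact hm ((PySem.Set.contains_iff seen e).mp h)
        have hme : e ∈ PySem.Set.add seen e := (PySem.Set.mem_add seen e e).mpr (Or.inr rfl)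
        simp only [evalLoopA, runsLoop, hc, Bool.false_and, bne_iff_ne, ne_eq, he,
          not_false_iff, if_true, Bool.false_eq_true]
        rw [if_neg (by simp)]
        rw [ih (PySem.Set.add seen e) e hme]
        constructor
        · rintro ⟨hnd, hall⟩
          refine ⟨List.nodup_cons.mpr ⟨fun hcon => ?_, hnd⟩, ?_⟩
          · have := hall e hcon
            rw [PySem.Set.mem_add] at this
            exact this (Or.inr rfl)
          · intro r hr
            rcases List.mem_cons.mp hr with h | h
            · exact h ▸ hm
            · intro hrs
              have := hall r h
              rw [PySem.Set.mem_add] at this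
              exact this (Or.inl hrs)
        · rintro ⟨hnd, hall⟩
          refine ⟨(List.nodup_cons.mp hnd).2, ?_⟩
          intro r hr
          rw [PySem.Set.mem_add]
          rintro (h | h)
          · exact hall r (List.mem_cons_of_mem _ hr) h
          · exact (List.nodup_cons.mp hnd).1 (h ▸ hr)

-- set(xs) has as many elements as xs iff xs has no duplicates.
theorem length_ofList_eq_iff (xs : List Int) :
    ((PySem.Set.ofList xs).length = xs.length) ↔ xs.Nodup := by
  induction xs with
  | nil => simp [PySem.Set.ofList_nil]
  | cons x xs ih =>
    rw [PySem.Set.ofList_cons]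
    by_cases hx : x ∈ xs
    · have hx' : x ∈ PySem.Set.ofList xs := (PySem.Set.mem_ofList xs x).mpr hx
      have hlt : ((PySem.Set.ofList xs).discard x).length < (PySem.Set.ofList xs).length := by
        apply List.length_filter_lt_length_iff_exists.mpr
        exact ⟨x, hx', by simp⟩
      have hle := PySem.Set.length_ofList_le (xs := xs)
      simp only [List.length_cons, List.nodup_cons]
      constructor
      · intro h; omega
      · rintro ⟨h, _⟩; exact absurd hx h
    · have : (PySem.Set.ofList xs).discard x = PySem.Set.ofList xs := by
        apply List.filter_eq_self.mpr
        intro a ha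
        have hne : a ≠ x := fun h => hx (h ▸ (PySem.Set.mem_ofList xs a).mp ha)
        simpa using hne
      rw [this]
      simp [List.nodup_cons, hx, ih]

theorem evaluate_eq_alt (p0 : Int) (rest : List Int) :
    evaluate (p0 :: rest) = evaluate_alt (p0 :: rest) := by
  have h1 : evaluate (p0 :: rest) = evalLoopA (PySem.Set.add PySem.Set.empty p0) p0 rest := by
    simp [evaluate, evalLoopA]
  have hmem : p0 ∈ PySem.Set.add PySem.Set.empty p0 :=
    (PySem.Set.mem_add PySem.Set.empty p0 p0).mpr (Or.inr rfl)
  rw [Bool.eq_iff_iff, h1, evalLoopA_iff rest _ p0 hmem]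
  have h2 : evaluate_alt (p0 :: rest) = true ↔ (p0 :: runsLoop p0 rest).Nodup := by
    simp only [evaluate_alt, beq_iff_eq]
    rw [eq_comm]
    exact length_ofList_eq_iff (p0 :: runsLoop p0 rest)
  rw [h2, List.nodup_cons]
  constructor
  · rintro ⟨hnd, hall⟩
    refine ⟨fun h => ?_, hnd⟩
    have := hall p0 h
    rw [PySem.Set.mem_add] at this
    exact this (Or.inr rfl)
  · rintro ⟨hni, hnd⟩
    refine ⟨hnd, fun r hr => ?_⟩
    rw [PySem.Set.mem_add]
    rintro (h | h)
    · simp [PySem.Set.empty] at h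
    · exact hni (h ▸ hr)

-- ===== VERDICT (by name: the statement is the Claim_ definition above) =====
theorem evaluate_spec : Claim_equal_evaluate := by
  intro report _ hpre
  unfold Spec_evaluate
  match report with
  | [] => exact absurd rfl hpre
  | p0 :: rest => exact evaluate_eq_alt p0 rest
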